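-- pv_equiv track=rewrite | github.com/siasio/reverso-context-with-blanks | __init__.py | highlight_example
-- ===== SOURCE A (Python) =====
-- def highlight_example(text, highlighted, left_highlighter="**", right_highlighter="**"):
--
--     def insert_char(string, index, char):
--         return string[:index] + char + string[index:]
--
--     def highlight_once(string, start, end, shift):
--         s = insert_char(string, start + shift, left_highlighter)
--         s = insert_char(s, end + shift + len(left_highlighter), right_highlighter)
--         return s
--
--     shift = 0
--     for start, end in highlighted:
--         text = highlight_once(text, start, end, shift)
--         shift += len(left_highlighter) + len(right_highlighter)
--     return text
-- ===== SOURCE B (Python) =====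
-- def highlight_example(text, highlighted, left_highlighter="**", right_highlighter="**"):
--     # Piece-list (rope) version: the text is kept as a list of fragments and each
--     # marker insertion splits one fragment in place, so no full-string copy per insertion.
--     def norm(i, n):
--         if i < 0:
--             i += n
--         if i < 0:
--             return 0
--         if i > n:
--             return n
--         return i
--
--     def splice(pieces, total, i, marker):
--         q = norm(i, total)
--         for j, p in enumerate(pieces):
--             if q <= len(p):
--                 pieces[j:j + 1] = [p[:q], marker, p[q:]]
--                 return
--             q -= len(p)
--         pieces.append(marker)
--
--     llen = len(left_highlighter)
--     rlen = len(right_highlighter)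
--     pieces = [text]
--     total = len(text)
--     shift = 0
--     for start, end in highlighted:
--         splice(pieces, total, start + shift, left_highlighter)
--         total += llen
--         splice(pieces, total, end + shift + llen, right_highlighter)
--         total += rlen
--         shift += llen + rlen
--     return "".join(pieces)
-- ===== Notes on version B (the rewrite author's own statement) =====
-- stated objective: faster
-- what changed: B keeps the text as a list of fragments (a piece list / rope) and each marker insertion splits one fragment in place, joining everything once at the end, instead of A's re-concatenation of the whole ever-growing string twice per highlighted pair.
import Mathlib
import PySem

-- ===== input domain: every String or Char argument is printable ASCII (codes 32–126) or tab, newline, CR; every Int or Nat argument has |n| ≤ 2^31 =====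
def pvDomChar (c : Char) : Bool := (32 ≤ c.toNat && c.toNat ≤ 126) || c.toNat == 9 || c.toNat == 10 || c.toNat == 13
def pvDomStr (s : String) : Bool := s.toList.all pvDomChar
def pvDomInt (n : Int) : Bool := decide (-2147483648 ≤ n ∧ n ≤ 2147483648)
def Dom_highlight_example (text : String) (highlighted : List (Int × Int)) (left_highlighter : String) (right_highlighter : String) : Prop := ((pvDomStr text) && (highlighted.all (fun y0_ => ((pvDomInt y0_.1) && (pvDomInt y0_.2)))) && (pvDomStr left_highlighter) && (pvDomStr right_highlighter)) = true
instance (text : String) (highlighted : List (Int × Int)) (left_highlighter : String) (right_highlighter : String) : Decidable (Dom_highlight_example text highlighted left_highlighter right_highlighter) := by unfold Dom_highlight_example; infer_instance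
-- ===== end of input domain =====

-- B replaces A's per-marker full-string re-concatenation by a piece list (rope): each
-- insertion splits one fragment, and the string is joined once at the end (objective: faster).

-- ===== PORT A =====
-- insert_char(string, index, char) = string[:index] + char + string[index:]
def pvInsertChar (s : List Char) (i : Int) (ch : List Char) : List Char :=
  PySem.List.slice s none (some i) ++ ch ++ PySem.List.slice s (some i) none

-- highlight_once(string, start, end, shift)
def pvHighlightOnce (lh rh : List Char) (s : List Char) (st en sh : Int) : List Char :=
  pvInsertChar (pvInsertChar s (st + sh) lh) (en + sh + (lh.length : Int)) rh

-- loop body: text = highlight_once(text, start, end, shift); shift += len(L) + len(R)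
def pvStepA (lh rh : List Char) (acc : List Char × Int) (p : Int × Int) : List Char × Int :=
  (pvHighlightOnce lh rh acc.1 p.1 p.2 acc.2, acc.2 + ((lh.length : Int) + (rh.length : Int)))

def highlight_example (text : String) (highlighted : List (Int × Int)) (left_highlighter : String) (right_highlighter : String) : String :=
  String.ofList (highlighted.foldl (pvStepA left_highlighter.toList right_highlighter.toList) (text.toList, 0)).1

-- ===== PORT B =====
-- norm(i, n): Python slice-index normalisation
def pvNorm (i : Int) (n : Nat) : Nat :=
  let i' := if i < 0 then i + (n : Int) else i
  if i' < 0 then 0 else if (n : Int) < i' then n else i'.toNat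

-- the scan inside splice: find the fragment containing position q and split it there
def pvSpliceGo (m : List Char) : List (List Char) → Nat → List (List Char)
  | [], _ => [m]
  | p :: ps, q =>
      if q ≤ p.length then p.take q :: m :: p.drop q :: ps
      else p :: pvSpliceGo m ps (q - p.length)

-- splice(pieces, total, i, marker)
def pvSplice (pieces : List (List Char)) (total : Nat) (i : Int) (m : List Char) : List (List Char) :=
  pvSpliceGo m pieces (pvNorm i total)

-- loop body of B: two splices, then total and shift bookkeeping
def pvStepB (lh rh : List Char) (acc : List (List Char) × Nat × Int) (p : Int × Int) :
    List (List Char) × Nat × Int :=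
  let ps1 := pvSplice acc.1 acc.2.1 (p.1 + acc.2.2) lh
  let t1 := acc.2.1 + lh.length
  let ps2 := pvSplice ps1 t1 (p.2 + acc.2.2 + (lh.length : Int)) rh
  (ps2, t1 + rh.length, acc.2.2 + ((lh.length : Int) + (rh.length : Int)))

def highlight_example_alt (text : String) (highlighted : List (Int × Int)) (left_highlighter : String) (right_highlighter : String) : String :=
  String.ofList
    (highlighted.foldl (pvStepB left_highlighter.toList right_highlighter.toList)
      ([text.toList], text.toList.length, 0)).1.flatten

-- ===== PRECONDITION & SPEC =====
def Spec_highlight_example (text : String) (highlighted : List (Int × Int)) (left_highlighter : String) (right_highlighter : String) (out : String) : Prop := out = highlight_example_alt text highlighted left_highlighter right_highlighter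
instance (text : String) (highlighted : List (Int × Int)) (left_highlighter : String) (right_highlighter : String) (out : String) : Decidable (Spec_highlight_example text highlighted left_highlighter right_highlighter out) := by unfold Spec_highlight_example; infer_instance

-- ===== CLAIM (what is proved, stated in full; the proofs are below) =====
def Claim_equal_highlight_example : Prop := ∀ (text : String) (highlighted : List (Int × Int)) (left_highlighter : String) (right_highlighter : String), Dom_highlight_example text highlighted left_highlighter right_highlighter → Spec_highlight_example text highlighted left_highlighter right_highlighter (highlight_example text highlighted left_highlighter right_highlighter)

-- ===== LEMMAS AND PROOFS =====

theorem pvNorm_char_neg (i : Int) (n : Nat) (h : i < 0) :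
    (pvNorm i n : Int) = max 0 (min (n : Int) (i + n)) := by
  unfold pvNorm
  dsimp only
  split_ifs <;> omega

theorem pvNorm_char_nonneg (i : Int) (n : Nat) (h : 0 ≤ i) :
    (pvNorm i n : Int) = min (n : Int) i := by
  unfold pvNorm
  dsimp only
  split_ifs <;> omega

theorem pv_take_norm (s : List Char) (i : Int) :
    PySem.List.slice s none (some i) = s.take (pvNorm i s.length) := by
  rcases lt_or_ge i 0 with hneg | hpos
  · have hc := pvNorm_char_neg i s.length hneg
    have hk : i = -((((-i).toNat : Nat)) : Int) := by omega
    rw [hk, PySem.List.slice_to_neg_natCast s (-i).toNat (by omega)]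
    congr 1
    rw [← hk]
    omega
  · have hc := pvNorm_char_nonneg i s.length hpos
    rw [PySem.List.slice_to s hpos]
    by_cases hle : i ≤ (s.length : Int)
    · congr 1; omega
    · rw [List.take_of_length_le (by omega), List.take_of_length_le (by omega)]

theorem pv_drop_norm (s : List Char) (i : Int) :
    PySem.List.slice s (some i) none = s.drop (pvNorm i s.length) := by
  rcases lt_or_ge i 0 with hneg | hpos
  · have hc := pvNorm_char_neg i s.length hneg
    have hk : i = -((((-i).toNat : Nat)) : Int) := by omega
    rw [hk, PySem.List.slice_from_neg_natCast s (-i).toNat (by omega)]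
    congr 1
    rw [← hk]
    omega
  · have hc := pvNorm_char_nonneg i s.length hpos
    rw [PySem.List.slice_from s hpos]
    by_cases hle : i ≤ (s.length : Int)
    · congr 1; omega
    · rw [List.drop_eq_nil_of_le (by omega), List.drop_eq_nil_of_le (by omega)]

theorem pv_insert_eq (s : List Char) (i : Int) (m : List Char) :
    pvInsertChar s i m = s.take (pvNorm i s.length) ++ m ++ s.drop (pvNorm i s.length) := by
  rw [pvInsertChar, pv_take_norm, pv_drop_norm]

theorem pv_insert_len (s : List Char) (i : Int) (m : List Char) :
    (pvInsertChar s i m).length = s.length + m.length := by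
  rw [pv_insert_eq]
  simp only [List.length_append, List.length_take, List.length_drop]
  omega

theorem pv_spliceGo_flatten (m : List Char) (ps : List (List Char)) (q : Nat) :
    (pvSpliceGo m ps q).flatten = ps.flatten.take q ++ m ++ ps.flatten.drop q := by
  induction ps generalizing q with
  | nil => simp [pvSpliceGo]
  | cons p ps ih =>
    simp only [pvSpliceGo]
    split_ifs with h
    · simp only [List.flatten_cons]
      rw [List.take_append_of_le_length h, List.drop_append_of_le_length h]
      simp [List.append_assoc]
    · simp only [List.flatten_cons, ih]
      rw [List.take_append, List.drop_append]
      rw [List.take_of_length_le (by omega : p.length ≤ q),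
          List.drop_eq_nil_of_le (by omega : p.length ≤ q)]
      simp [List.append_assoc]

theorem pv_splice_len (ps : List (List Char)) (t : Nat) (i : Int) (m : List Char) :
    (pvSplice ps t i m).flatten.length = ps.flatten.length + m.length := by
  rw [pvSplice, pv_spliceGo_flatten]
  simp only [List.length_append, List.length_take, List.length_drop]
  omega

theorem pv_fold_inv (lh rh : List Char) (hl : List (Int × Int)) :
    ∀ (ps : List (List Char)) (sh : Int) (t : Nat), t = ps.flatten.length →
      (hl.foldl (pvStepB lh rh) (ps, t, sh)).1.flatten
        = (hl.foldl (pvStepA lh rh) (ps.flatten, sh)).1 := by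
  induction hl with
  | nil => intro ps sh t ht; rfl
  | cons hd tl ih =>
    intro ps sh t ht
    subst ht
    simp only [List.foldl_cons]
    have hs : (pvStepB lh rh (ps, ps.flatten.length, sh) hd).1.flatten
        = (pvStepA lh rh (ps.flatten, sh) hd).1 := by
      dsimp only [pvStepA, pvStepB, pvHighlightOnce]
      have h1 : (pvSplice ps ps.flatten.length (hd.1 + sh) lh).flatten
          = pvInsertChar ps.flatten (hd.1 + sh) lh := by
        rw [pvSplice, pv_spliceGo_flatten, pv_insert_eq]
      rw [pvSplice, pv_spliceGo_flatten, h1,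
          pv_insert_eq (pvInsertChar ps.flatten (hd.1 + sh) lh), pv_insert_len]
    have hlen2 : (pvStepB lh rh (ps, ps.flatten.length, sh) hd).2.1
        = (pvStepB lh rh (ps, ps.flatten.length, sh) hd).1.flatten.length := by
      dsimp only [pvStepB]
      rw [pv_splice_len, pv_splice_len]
    have ihX := ih (pvStepB lh rh (ps, ps.flatten.length, sh) hd).1
      (pvStepB lh rh (ps, ps.flatten.length, sh) hd).2.2
      (pvStepB lh rh (ps, ps.flatten.length, sh) hd).2.1 hlen2
    rw [hs] at ihX
    exact ihX

-- ===== VERDICT (by name: the statement is the Claim_ definition above) =====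
theorem highlight_example_spec : Claim_equal_highlight_example := by
  intro text highlighted l r _
  unfold Spec_highlight_example highlight_example highlight_example_alt
  have h := pv_fold_inv l.toList r.toList highlighted [text.toList] 0 text.toList.length
    (by simp)
  simp only [List.flatten_cons, List.flatten_nil, List.append_nil] at h
  rw [h]
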